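-- pv_equiv track=rewrite | github.com/d1ssmuss/Codewars-2025 | Python/6 kyu Moves in squared strings (III).py | selfie_and_diag1
-- ===== SOURCE A (Python) =====
-- def selfie_and_diag1(strng):
--     words = []  # words = [word1, word2, word3...]
--     words = strng.split("\n")
--
--     # беру первые символы и переворачиваю их
--     # также между словами должны быть \n
--     answ = []
--     row = ""
--     # во всех словах длина == (одинакова)
--     for i in range(len(words[0])):  # слова
--         row = words[i] + "|" # первое слово
--         for j in range(len(words)):  # буква
--             row += words[j][i]
--         answ.append(row)
--         row = ""
--     return "\n".join(answ)
-- ===== SOURCE B (Python) =====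
-- def selfie_and_diag1(strng):
--     words = strng.split("\n")
--
--     def transpose(rows, k):
--         # peel the head character off every row, recurse on the tails
--         if k == 0:
--             return []
--         col = "".join(r[0] for r in rows)
--         return [col] + transpose([r[1:] for r in rows], k - 1)
--
--     cols = transpose(words, len(words[0]))
--     return "\n".join(w + "|" + c for w, c in zip(words, cols))
-- ===== Notes on version B (the rewrite author's own statement) =====
-- stated objective: alternative
-- what changed: B replaces A's indexed nested loops by a recursive head/tail transpose (peel the first character of every row, recurse on the tails) and then zips each word with its column, so no character is ever fetched by index.
import Mathlib
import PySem

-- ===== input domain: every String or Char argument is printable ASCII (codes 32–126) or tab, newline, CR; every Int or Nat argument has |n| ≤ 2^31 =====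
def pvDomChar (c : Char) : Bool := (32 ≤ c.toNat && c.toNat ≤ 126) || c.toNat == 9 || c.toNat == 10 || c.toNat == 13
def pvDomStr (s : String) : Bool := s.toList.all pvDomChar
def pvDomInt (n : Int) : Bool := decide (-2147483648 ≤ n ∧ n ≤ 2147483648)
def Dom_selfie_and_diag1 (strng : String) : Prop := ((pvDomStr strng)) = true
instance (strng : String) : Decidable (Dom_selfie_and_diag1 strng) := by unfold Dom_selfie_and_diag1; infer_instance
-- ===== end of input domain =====

-- B computes the transpose by a head/tail recursion (peel the first character of every row,
-- recurse on the tails) and zips words with columns, instead of A's indexed nested loops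
-- (alternative algorithm, same cost).


-- ===== PORT A =====
-- single interleaved loop: for each i build the row "words[i] + '|' + column i" character by character
def selfie_and_diag1 (strng : String) : String :=
  let words := PySem.Chars.splitOn strng.toList ['\n']
  let answ := (PySem.List.pyRange 0 (PySem.List.len (PySem.List.pyGetD words 0 []))).foldl
    (fun answ i =>
      let row := PySem.List.pyGetD words i [] ++ ['|']
      let row := (PySem.List.pyRange 0 (PySem.List.len words)).foldl
        (fun row j => row ++ [PySem.List.pyGetD (PySem.List.pyGetD words j []) i ' ']) row
      answ ++ [row]) []
  String.ofList (PySem.Chars.join ['\n'] answ)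

-- ===== PORT B =====
-- recursive transpose: column k is the heads of the rows, then recurse on the tails (r[1:])
def pvTranspose (rows : List (List Char)) (k : Nat) : List (List Char) :=
  match k with
  | 0 => []
  | k + 1 =>
      (rows.map (fun r => PySem.List.pyGetD r 0 ' '))
        :: pvTranspose (rows.map (fun r => PySem.List.slice r (some 1) none)) k

def selfie_and_diag1_alt (strng : String) : String :=
  let words := PySem.Chars.splitOn strng.toList ['\n']
  let cols := pvTranspose words (PySem.List.pyGetD words 0 []).length
  String.ofList (PySem.Chars.join ['\n']
    ((List.zip words cols).map (fun wc => wc.1 ++ ['|'] ++ wc.2)))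

-- ===== PRECONDITION & SPEC =====
-- Pre_ excludes exactly the inputs on which A raises IndexError: when the number of lines is
-- smaller than the length of the first line, or some line is shorter than the first line.
def Pre_selfie_and_diag1 (strng : String) : Prop :=
  (PySem.List.pyGetD (PySem.Chars.splitOn strng.toList ['\n']) 0 []).length
      ≤ (PySem.Chars.splitOn strng.toList ['\n']).length
  ∧ ∀ w ∈ PySem.Chars.splitOn strng.toList ['\n'],
      (PySem.List.pyGetD (PySem.Chars.splitOn strng.toList ['\n']) 0 []).length ≤ w.length
instance (strng : String) : Decidable (Pre_selfie_and_diag1 strng) := by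
  unfold Pre_selfie_and_diag1; infer_instance
def pvWitness_selfie_and_diag1 : String := "ab\ncd"
def Spec_selfie_and_diag1 (strng : String) (out : String) : Prop := out = selfie_and_diag1_alt strng
instance (strng : String) (out : String) : Decidable (Spec_selfie_and_diag1 strng out) := by unfold Spec_selfie_and_diag1; infer_instance

-- ===== CLAIM (what is proved, stated in full; the proofs are below) =====
def Claim_equal_selfie_and_diag1 : Prop := ∀ (strng : String), Dom_selfie_and_diag1 strng → Pre_selfie_and_diag1 strng → Spec_selfie_and_diag1 strng (selfie_and_diag1 strng)

-- ===== LEMMAS AND PROOFS =====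

-- characterisation of the recursive transpose
theorem pvTranspose_eq (k : Nat) (rows : List (List Char)) :
    pvTranspose rows k
      = (List.range k).map (fun i => rows.map (fun r => r.getD i ' ')) := by
  induction k generalizing rows with
  | zero => simp [pvTranspose]
  | succ k ih =>
      rw [pvTranspose, ih, List.range_succ_eq_map]
      simp only [List.map_cons, List.map_map, PySem.List.slice_from_one,
        PySem.List.pyGetD_zero]
      congr 1
      apply List.map_congr_left
      intro i _
      simp [Function.comp]

-- ===== VERDICT (by name: the statement is the Claim_ definition above) =====
theorem selfie_and_diag1_spec : Claim_equal_selfie_and_diag1 := by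
  intro strng _ hpre
  unfold Spec_selfie_and_diag1 selfie_and_diag1 selfie_and_diag1_alt
  set words := PySem.Chars.splitOn strng.toList ['\n'] with hw
  set n := (PySem.List.pyGetD words 0 []).length with hn
  have h1 : n ≤ words.length := hpre.1
  -- A side: rewrite the two append-singleton foldl's to maps
  simp only [PySem.List.foldl_append_singleton_eq_map, List.nil_append]
  congr 1
  apply congrArg
  rw [pvTranspose_eq]
  have hA : PySem.List.pyRange 0 (PySem.List.len (PySem.List.pyGetD words 0 []))
      = (List.range n).map (fun k : Nat => (k : Int)) := by
    rw [PySem.List.pyRange_one]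
    have ht : (PySem.List.len (PySem.List.pyGetD words 0 []) - 0).toNat = n := by
      rw [hn]; simp [PySem.List.len]
    rw [ht]
    exact List.map_congr_left (fun k _ => zero_add _)
  rw [hA, List.map_map]
  apply List.ext_getElem
  · simp only [List.length_map, List.length_range, List.length_zip]
    omega
  · intro i hi1 hi2
    simp only [List.length_map, List.length_range] at hi1
    have hiw : i < words.length := lt_of_lt_of_le hi1 h1
    simp only [List.getElem_map, List.getElem_range, List.getElem_zip, Function.comp]
    have hinner : (PySem.List.pyRange 0 (PySem.List.len words)).map
          (fun j => PySem.List.pyGetD (PySem.List.pyGetD words j []) (i : Int) ' ')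
        = words.map (fun r => PySem.List.pyGetD r (i : Int) ' ') := by
      conv_rhs => rw [← PySem.List.map_pyGetD_pyRange_zero (xs := words) (d := ([] : List Char))]
      rw [List.map_map]
      rfl
    rw [hinner]
    simp [PySem.List.pyGetD_natCast, List.getD_eq_getElem?_getD,
      List.getElem?_eq_getElem hiw]
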